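-- pv_equiv track=rewrite | github.com/pedrorvc/chewBBACA | tests/chewBBACA_CreateSchema_nonPairwise_TEST.py | determine_contained
-- ===== SOURCE A (Python) =====
-- def determine_contained(proteins):
--     """
--     """
--
--     # get all prots
--     protein_sequences = list(proteins.keys())
--     # sort by ascending length to facilitate search
--     protein_sequences = sorted(protein_sequences, key=len)
--
--     # verify if each prot is contained in another, starting with smaller ones
--     contained = {}
--     for protein in range(len(protein_sequences)):
--         current_protein = protein_sequences[protein]
--
--         # the set of searched proteins will decrease with each iteration
--         # due to initial sorting
--         for protein2 in range(protein+1,len(protein_sequences)):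
--             if current_protein in protein_sequences[protein2]:
--                 contained[current_protein] = proteins[current_protein]
--
--     return contained
-- ===== SOURCE B (Python) =====
-- def determine_contained(proteins):
--     # index all proper substrings of every protein once, then a single
--     # membership test per protein replaces A's inner scan over longer proteins
--     subs = set()
--     for q in proteins:
--         L = len(q)
--         for i in range(L + 1):
--             for j in range(i, L + 1):
--                 if j - i < L:
--                     subs.add(q[i:j])
--     return {p: proteins[p] for p in sorted(proteins, key=len) if p in subs}
-- ===== Notes on version B (the rewrite author's own statement) =====
-- stated objective: faster
-- what changed: B indexes every proper-length substring of the keys in one hash set built up front, so each protein is decided by a single set-membership test instead of A's per-protein scan searching it inside every longer protein.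
import Mathlib
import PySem

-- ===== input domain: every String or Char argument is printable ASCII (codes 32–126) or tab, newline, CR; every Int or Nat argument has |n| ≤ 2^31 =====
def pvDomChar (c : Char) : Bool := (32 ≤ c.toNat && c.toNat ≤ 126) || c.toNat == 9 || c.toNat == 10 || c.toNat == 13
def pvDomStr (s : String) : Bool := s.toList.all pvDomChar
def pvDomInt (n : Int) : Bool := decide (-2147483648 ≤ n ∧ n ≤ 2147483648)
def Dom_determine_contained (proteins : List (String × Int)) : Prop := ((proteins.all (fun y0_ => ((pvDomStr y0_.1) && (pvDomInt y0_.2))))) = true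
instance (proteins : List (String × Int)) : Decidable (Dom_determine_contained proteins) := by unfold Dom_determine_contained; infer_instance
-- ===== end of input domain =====

-- B builds a set of all proper-length substrings of the keys once and then decides each
-- protein by one set-membership test, instead of A's scan of every longer protein per protein;
-- the returned dict (as its items list) is proved equal on all inputs.

-- ===== PORT A =====
def determine_contained (proteins : List (String × Int)) : List (String × Int) :=
  let d := PySem.Dict.ofList proteins
  let protein_sequences := PySem.List.sorted d.keys (fun s => PySem.Str.len s) false
  let contained := (PySem.List.pyRange 0 (PySem.List.len protein_sequences)).foldl
    (fun contained protein =>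
      let current_protein := PySem.List.pyGetD protein_sequences protein ""
      (PySem.List.pyRange (protein + 1) (PySem.List.len protein_sequences)).foldl
        (fun contained protein2 =>
          if PySem.Str.isIn current_protein (PySem.List.pyGetD protein_sequences protein2 "") then
            contained.insert current_protein (d.getD current_protein 0)
          else contained)
        contained)
    PySem.Dict.empty
  contained.items

-- ===== PORT B =====
def determine_contained_alt (proteins : List (String × Int)) : List (String × Int) :=
  let d := PySem.Dict.ofList proteins
  let subs := d.keys.foldl (fun subs q =>
      let L := PySem.Str.len q
      (PySem.List.pyRange 0 (L + 1)).foldl (fun subs i =>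
        (PySem.List.pyRange i (L + 1)).foldl (fun subs j =>
          if j - i < L then PySem.Set.add subs (PySem.Str.slice q (some i) (some j)) else subs)
          subs)
        subs)
    PySem.Set.empty
  let out := (PySem.List.sorted d.keys (fun s => PySem.Str.len s) false).foldl
    (fun out p => if PySem.Set.contains subs p then out.insert p (d.getD p 0) else out)
    PySem.Dict.empty
  out.items

-- ===== PRECONDITION & SPEC =====
def Spec_determine_contained (proteins : List (String × Int)) (out : List (String × Int)) : Prop := out = determine_contained_alt proteins
instance (proteins : List (String × Int)) (out : List (String × Int)) : Decidable (Spec_determine_contained proteins out) := by unfold Spec_determine_contained; infer_instance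

-- ===== CLAIM (what is proved, stated in full; the proofs are below) =====
def Claim_equal_determine_contained : Prop := ∀ (proteins : List (String × Int)), Dom_determine_contained proteins → Spec_determine_contained proteins (determine_contained proteins)

-- ===== LEMMAS AND PROOFS =====

-- a loop that conditionally re-inserts the SAME key/value collapses to one conditional insert
theorem pvFoldlInsertIf {κ ν : Type} [BEq κ] [LawfulBEq κ] (l : List Int) (b : Int → Bool)
    (k : κ) (v : ν) (c : PySem.Dict κ ν) :
    l.foldl (fun c j => if b j then c.insert k v else c) c
      = if l.any b then c.insert k v else c := by
  induction l generalizing c with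
  | nil => simp
  | cons hd tl ih =>
    by_cases h : b hd = true
    · simp [List.foldl_cons, h, ih, PySem.Dict.insert_insert_self]
    · simp [List.foldl_cons, h, ih]

-- membership through a fold whose step satisfies a membership law
theorem pvMemFoldl {α β : Type} (h : List α → β → List α) (G : β → α → Prop)
    (hh : ∀ s b y, y ∈ h s b ↔ y ∈ s ∨ G b y) (l : List β) (s : List α) (y : α) :
    y ∈ l.foldl h s ↔ y ∈ s ∨ ∃ b ∈ l, G b y := by
  induction l generalizing s with
  | nil => simp
  | cons hd tl ih =>
    simp only [List.foldl_cons, ih, hh]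
    constructor
    · rintro ((hs | hG) | ⟨b, hb, hGb⟩)
      · exact Or.inl hs
      · exact Or.inr ⟨hd, by simp, hG⟩
      · exact Or.inr ⟨b, by simp [hb], hGb⟩
    · rintro (hs | ⟨b, hb, hGb⟩)
      · exact Or.inl (Or.inl hs)
      · rcases List.mem_cons.mp hb with rfl | hb
        · exact Or.inl (Or.inr hGb)
        · exact Or.inr ⟨b, hb, hGb⟩

-- "x is a slice of q shorter than q"  ↔  "x is a proper-length infix of q"
theorem pvSliceIffInfix (q x : String) :
    (∃ i ∈ PySem.List.pyRange 0 (PySem.Str.len q + 1),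
      ∃ j ∈ PySem.List.pyRange i (PySem.Str.len q + 1),
        (j - i < PySem.Str.len q) ∧ x = PySem.Str.slice q (some i) (some j))
    ↔ (x.toList <:+: q.toList ∧ x.toList.length < q.toList.length) := by
  constructor
  · rintro ⟨i, hi, j, hj, hlt, rfl⟩
    rw [PySem.List.mem_pyRange_one] at hi hj
    rw [PySem.Str.len_eq] at hi hj hlt
    have h0i : 0 ≤ i := hi.1
    have h0j : 0 ≤ j := le_trans h0i hj.1
    have htl : (PySem.Str.slice q (some i) (some j)).toList
        = List.take (j.toNat - i.toNat) (List.drop i.toNat q.toList) := by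
      rw [PySem.Str.toList_slice]
      exact PySem.List.slice_toNat q.toList h0i h0j
    rw [htl]
    refine ⟨((List.take_prefix _ _).isInfix).trans ((List.drop_suffix _ _).isInfix), ?_⟩
    rw [List.length_take, List.length_drop]
    omega
  · rintro ⟨⟨s, t, hst⟩, hlen⟩
    have hq : s.length + x.toList.length + t.length = q.toList.length := by
      have h := congrArg List.length hst
      rw [List.length_append, List.length_append] at h
      exact h
    refine ⟨(s.length : Int), ?_, ((s.length + x.toList.length : Nat) : Int), ?_, ?_, ?_⟩
    · rw [PySem.List.mem_pyRange_one, PySem.Str.len_eq]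
      constructor
      · positivity
      · omega
    · rw [PySem.List.mem_pyRange_one, PySem.Str.len_eq]
      constructor
      · push_cast; omega
      · push_cast; omega
    · rw [PySem.Str.len_eq]; omega
    · rw [← String.toList_inj, PySem.Str.toList_slice]
      have hcs : ∀ (l : List Char) (a b : Option Int), PySem.Chars.slice l a b = PySem.List.slice l a b := fun _ _ _ => rfl
      rw [hcs]
      rw [PySem.List.slice_toNat q.toList (Int.natCast_nonneg _) (Int.natCast_nonneg _)]
      have h1 : ((s.length : Int)).toNat = s.length := by omega
      have h2 : (((s.length + x.toList.length : Nat) : Int)).toNat = s.length + x.toList.length := by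
        omega
      rw [h1, h2]
      have hd : List.drop s.length q.toList = x.toList ++ t := by
        rw [← hst, List.append_assoc, List.drop_left]
      rw [hd]
      have h3 : s.length + x.toList.length - s.length = x.toList.length := by omega
      rw [h3, List.take_left]

-- the substring set built by B holds exactly the proper-length infixes of the keys
theorem pvMemSubs (keys : List String) (x : String) :
    x ∈ keys.foldl (fun subs q =>
        let L := PySem.Str.len q
        (PySem.List.pyRange 0 (L + 1)).foldl (fun subs i =>
          (PySem.List.pyRange i (L + 1)).foldl (fun subs j =>
            if j - i < L then PySem.Set.add subs (PySem.Str.slice q (some i) (some j)) else subs)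
            subs)
          subs)
      PySem.Set.empty
    ↔ ∃ q ∈ keys, x.toList <:+: q.toList ∧ x.toList.length < q.toList.length := by
  have hinner : ∀ (q : String) (i : Int) (s : PySem.Set String) (y : String),
      y ∈ (PySem.List.pyRange i (PySem.Str.len q + 1)).foldl (fun subs j =>
            if j - i < PySem.Str.len q then PySem.Set.add subs (PySem.Str.slice q (some i) (some j)) else subs) s
      ↔ y ∈ s ∨ ∃ j ∈ PySem.List.pyRange i (PySem.Str.len q + 1),
          (j - i < PySem.Str.len q) ∧ y = PySem.Str.slice q (some i) (some j) := by
    intro q i s y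
    refine pvMemFoldl _ (fun j y => (j - i < PySem.Str.len q) ∧ y = PySem.Str.slice q (some i) (some j)) ?_ _ s y
    intro s' j y'
    have hcast : (PySem.Str.len q = (q.length : Int)) := by
      rw [PySem.Str.len_eq, String.length_toList]
    split_ifs with h
    · rw [hcast] at h
      simp [PySem.Set.mem_add, h]
    · rw [hcast] at h
      simp [h]
  have hmid : ∀ (q : String) (s : PySem.Set String) (y : String),
      y ∈ (PySem.List.pyRange 0 (PySem.Str.len q + 1)).foldl (fun subs i =>
            (PySem.List.pyRange i (PySem.Str.len q + 1)).foldl (fun subs j =>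
              if j - i < PySem.Str.len q then PySem.Set.add subs (PySem.Str.slice q (some i) (some j)) else subs) subs) s
      ↔ y ∈ s ∨ ∃ i ∈ PySem.List.pyRange 0 (PySem.Str.len q + 1),
            ∃ j ∈ PySem.List.pyRange i (PySem.Str.len q + 1),
              (j - i < PySem.Str.len q) ∧ y = PySem.Str.slice q (some i) (some j) := by
    intro q s y
    exact pvMemFoldl _ _ (fun s' i y' => hinner q i s' y') _ s y
  have houter := pvMemFoldl
      (fun subs (q : String) =>
        (PySem.List.pyRange 0 (PySem.Str.len q + 1)).foldl (fun subs i =>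
          (PySem.List.pyRange i (PySem.Str.len q + 1)).foldl (fun subs j =>
            if j - i < PySem.Str.len q then PySem.Set.add subs (PySem.Str.slice q (some i) (some j)) else subs) subs) subs)
      (fun q y => y.toList <:+: q.toList ∧ y.toList.length < q.toList.length)
      (fun s' q y => (hmid q s' y).trans (by rw [pvSliceIffInfix q y]))
      keys PySem.Set.empty x
  simpa [PySem.Set.empty] using houter

-- A's inner-loop condition at index i says "seqs[i] is a proper-length infix of some key"
theorem pvInnerAny (keys : List String) (hnd : keys.Nodup) (S : List String)
    (hS : S = PySem.List.sorted keys (fun s => PySem.Str.len s) false)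
    (i : Int) (hi0 : 0 ≤ i) (hin : i < (S.length : Int)) :
    ((PySem.List.pyRange (i + 1) (PySem.List.len S)).any
      (fun j => PySem.Str.isIn (PySem.List.pyGetD S i "") (PySem.List.pyGetD S j ""))) = true
    ↔ ∃ q ∈ keys, (PySem.List.pyGetD S i "").toList <:+: q.toList ∧
        (PySem.List.pyGetD S i "").toList.length < q.toList.length := by
  have hperm : S.Perm keys := hS ▸ PySem.List.sorted_perm keys (fun s => PySem.Str.len s) false
  have hndS : S.Nodup := hperm.nodup_iff.mpr hnd
  have hpair : S.Pairwise (fun a b => PySem.Str.len a ≤ PySem.Str.len b) :=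
    hS ▸ PySem.List.sorted_pairwise keys (fun s => PySem.Str.len s)
  have hgi : PySem.List.pyGetD S i "" = S[i.toNat]'(by omega) :=
    PySem.List.pyGetD_eq_getElem S "" hi0 hin
  rw [List.any_eq_true]
  constructor
  · rintro ⟨j, hj, hIn⟩
    rw [PySem.List.mem_pyRange_one] at hj
    rw [PySem.List.len_eq] at hj
    have hj0 : 0 ≤ j := by omega
    have hgj : PySem.List.pyGetD S j "" = S[j.toNat]'(by omega) :=
      PySem.List.pyGetD_eq_getElem S "" hj0 (by omega)
    rw [hgi, hgj, PySem.Str.isIn_iff_infix] at hIn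
    refine ⟨S[j.toNat]'(by omega), hperm.mem_iff.mp (List.getElem_mem _), hgi ▸ hIn, ?_⟩
    rw [hgi]
    have hle := hIn.length_le
    rcases lt_or_eq_of_le hle with hlt | heq
    · exact hlt
    · exfalso
      have heq2 : (S[i.toNat]'(by omega)) = S[j.toNat]'(by omega) :=
        String.toList_inj.mp (hIn.eq_of_length heq)
      have := (hndS.getElem_inj_iff).mp heq2
      omega
  · rintro ⟨q, hq, hinf, hlen⟩
    rw [hgi] at hinf hlen
    obtain ⟨jt, hjt, rfl⟩ := List.mem_iff_getElem.mp (hperm.mem_iff.mpr hq)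
    have hij : i.toNat < jt := by
      by_contra hle
      push Not at hle
      rcases Nat.lt_or_ge jt i.toNat with hlt | hge
      · have hp := List.pairwise_iff_getElem.mp hpair jt i.toNat hjt (by omega) hlt
        rw [PySem.Str.len_eq, PySem.Str.len_eq] at hp
        omega
      · have heq2 : (S[jt]'hjt) = S[i.toNat]'(by omega) := by
          congr 1
          omega
        rw [heq2] at hlen
        omega
    refine ⟨(jt : Int), ?_, ?_⟩
    · rw [PySem.List.mem_pyRange_one, PySem.List.len_eq]
      omega
    · have hgj : PySem.List.pyGetD S (jt : Int) "" = S[jt]'hjt :=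
        PySem.List.pyGetD_eq_getElem S "" (by omega) (by exact_mod_cast hjt) |>.trans (by simp)
      rw [hgi, hgj, PySem.Str.isIn_iff_infix]
      exact hinf

-- ===== VERDICT (by name: the statement is the Claim_ definition above) =====
theorem determine_contained_spec : Claim_equal_determine_contained := by
  intro proteins _
  unfold Spec_determine_contained determine_contained determine_contained_alt
  dsimp only
  refine congrArg PySem.Dict.items ?_
  have hnd : (PySem.Dict.ofList proteins).keys.Nodup := PySem.Dict.nodup_keys_ofList proteins
  set d := PySem.Dict.ofList proteins with hd
  set S := PySem.List.sorted d.keys (fun s => PySem.Str.len s) false with hS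
  set Pb : String → Bool := fun p =>
    d.keys.any (fun q => PySem.Str.isIn p q && decide (p.toList.length < q.toList.length)) with hPb
  have hPbIff : ∀ p : String, Pb p = true ↔
      ∃ q ∈ d.keys, p.toList <:+: q.toList ∧ p.toList.length < q.toList.length := by
    intro p
    rw [hPb]
    simp [List.any_eq_true, Bool.and_eq_true, PySem.Chars.isIn_iff_infix]
  set F : PySem.Dict String Int → String → PySem.Dict String Int := fun c p =>
    if Pb p then c.insert p (d.getD p 0) else c with hF
  have hA : (PySem.List.pyRange 0 (PySem.List.len S)).foldl
      (fun contained protein =>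
        (PySem.List.pyRange (protein + 1) (PySem.List.len S)).foldl
          (fun contained protein2 =>
            if PySem.Str.isIn (PySem.List.pyGetD S protein "") (PySem.List.pyGetD S protein2 "") then
              contained.insert (PySem.List.pyGetD S protein "") (d.getD (PySem.List.pyGetD S protein "") 0)
            else contained)
          contained)
      PySem.Dict.empty
      = S.foldl F PySem.Dict.empty := by
    have hcongr := PySem.List.foldl_congr_mem (PySem.List.pyRange 0 (PySem.List.len S))
      (fun contained protein =>
        (PySem.List.pyRange (protein + 1) (PySem.List.len S)).foldl
          (fun contained protein2 =>
            if PySem.Str.isIn (PySem.List.pyGetD S protein "") (PySem.List.pyGetD S protein2 "") then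
              contained.insert (PySem.List.pyGetD S protein "") (d.getD (PySem.List.pyGetD S protein "") 0)
            else contained)
          contained)
      (fun c i => F c (PySem.List.pyGetD S i ""))
      PySem.Dict.empty
      ?_
    · rw [hcongr]
      have hfm : List.foldl (fun c i => F c (PySem.List.pyGetD S i "")) PySem.Dict.empty (PySem.List.pyRange 0 (PySem.List.len S))
          = List.foldl F PySem.Dict.empty ((PySem.List.pyRange 0 (PySem.List.len S)).map (fun j => PySem.List.pyGetD S j "")) :=
        List.foldl_map.symm
      rw [hfm, PySem.List.map_pyGetD_pyRange_zero S ""]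
    · intro c i hi
      dsimp only
      rw [PySem.List.mem_pyRange_one, PySem.List.len_eq] at hi
      rw [pvFoldlInsertIf (PySem.List.pyRange (i + 1) (PySem.List.len S))
        (fun j => PySem.Str.isIn (PySem.List.pyGetD S i "") (PySem.List.pyGetD S j ""))
        (PySem.List.pyGetD S i "") (d.getD (PySem.List.pyGetD S i "") 0) c]
      rw [hF]
      have hcond : ((PySem.List.pyRange (i + 1) (PySem.List.len S)).any
          (fun j => PySem.Str.isIn (PySem.List.pyGetD S i "") (PySem.List.pyGetD S j "")))
          = Pb (PySem.List.pyGetD S i "") := by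
        rw [Bool.eq_iff_iff]
        rw [pvInnerAny d.keys hnd S hS i hi.1 hi.2]
        rw [hPbIff]
      rw [hcond]
  have hB : S.foldl
      (fun out p => if PySem.Set.contains
          (d.keys.foldl (fun subs q =>
            (PySem.List.pyRange 0 (PySem.Str.len q + 1)).foldl (fun subs i =>
              (PySem.List.pyRange i (PySem.Str.len q + 1)).foldl (fun subs j =>
                if j - i < PySem.Str.len q then PySem.Set.add subs (PySem.Str.slice q (some i) (some j)) else subs)
                subs)
              subs)
            PySem.Set.empty) p then out.insert p (d.getD p 0) else out)
      PySem.Dict.empty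
      = S.foldl F PySem.Dict.empty := by
    refine PySem.List.foldl_congr_mem S _ F PySem.Dict.empty ?_
    intro c p _
    have hcond : PySem.Set.contains
        (d.keys.foldl (fun subs q =>
          (PySem.List.pyRange 0 (PySem.Str.len q + 1)).foldl (fun subs i =>
            (PySem.List.pyRange i (PySem.Str.len q + 1)).foldl (fun subs j =>
              if j - i < PySem.Str.len q then PySem.Set.add subs (PySem.Str.slice q (some i) (some j)) else subs)
              subs)
            subs)
          PySem.Set.empty) p = Pb p := by
      rw [Bool.eq_iff_iff]
      rw [PySem.Set.contains_iff]
      rw [pvMemSubs d.keys p]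
      rw [hPbIff]
    rw [hF, hcond]
  rw [hA]
  exact hB.symm
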